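-- pv_equiv track=rewrite | github.com/pypi-data/pypi-mirror-158 | packages/acceltools/acceltools-0.0.12-py3-none-any.whl/acceltools/series.py | _get_dihedral_set
-- ===== SOURCE A (Python) =====
-- from typing import Iterable, Sequence, Set, Tuple, Union
--
-- def _get_angle_set(bonds: Set[Tuple[int]]) -> Set[Tuple[int]]:
--     ang_set = set()
--     for _b in bonds:
--         for _al in [(_b[0], _b[1]), (_b[1], _b[0])]:
--             for _pair_bond in [_pair_b for _pair_b in bonds if _al[0] in _pair_b and _b != _pair_b]:
--                 if _al[0] == _pair_bond[0]:
--                     another_atom = _pair_bond[1]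
--                 else:
--                     another_atom = _pair_bond[0]
--                 if another_atom < _al[1]:
--                     ang_set.add((another_atom, _al[0], _al[1]))
--                 elif another_atom > _al[1]:
--                     ang_set.add((_al[1], _al[0], another_atom))
--                 else:
--                     pass
--     return ang_set
--
-- def _get_dihedral_set(bonds: Set[Tuple[int]]) -> Set[Tuple[int]]:
--     dihed_set = set()
--     for ang in _get_angle_set(bonds):
--         for _al in [(ang[0], ang[1], ang[2]), (ang[2], ang[1], ang[0])]:
--             for _pair_bond in [_pair_b for _pair_b in bonds if _al[0] in _pair_b and _al[1] not in _pair_b]: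
--                 if _al[0] == _pair_bond[0]:
--                     another_atom = _pair_bond[1]
--                 else:
--                     another_atom = _pair_bond[0]
--                 if _al[0] < _al[1]:
--                     dihed_set.add((another_atom, _al[0], _al[1], _al[2]))
--                 elif _al[0] > _al[1]:
--                     dihed_set.add((_al[2], _al[1], _al[0], another_atom))
--                 else:
--                     pass
--     return dihed_set
-- ===== SOURCE B (Python) =====
-- def _get_dihedral_set(bonds):
--     adj = {}
--     for p in bonds:
--         for a in set(p):
--             adj.setdefault(a, []).append(p)
--     dihed = set()
--     for b in bonds:
--         for c, v in ((b[0], b[1]), (b[1], b[0])):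
--             for p2 in adj.get(c, []):
--                 if p2 == b:
--                     continue
--                 u = p2[1] if c == p2[0] else p2[0]
--                 if u == v:
--                     continue
--                 lo, hi = (u, v) if u < v else (v, u)
--                 for x, z in ((lo, hi), (hi, lo)):
--                     for p in adj.get(x, []):
--                         if c in p:
--                             continue
--                         w = p[1] if x == p[0] else p[0]
--                         if x < c:
--                             dihed.add((w, x, c, z))
--                         elif x > c:
--                             dihed.add((z, c, x, w))
--     return dihed
-- ===== Notes on version B (the rewrite author's own statement) =====
-- stated objective: faster
-- what changed: B drops A's two-phase design (build a canonical angle-triple set, then rescan all bonds to extend each angle): it makes one fused pass that looks up neighbours in a precomputed atom-to-incident-bonds dictionary and emits dihedral tuples directly, with no intermediate angle set and no full-bond-list scans per derivation.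
import Mathlib
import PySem

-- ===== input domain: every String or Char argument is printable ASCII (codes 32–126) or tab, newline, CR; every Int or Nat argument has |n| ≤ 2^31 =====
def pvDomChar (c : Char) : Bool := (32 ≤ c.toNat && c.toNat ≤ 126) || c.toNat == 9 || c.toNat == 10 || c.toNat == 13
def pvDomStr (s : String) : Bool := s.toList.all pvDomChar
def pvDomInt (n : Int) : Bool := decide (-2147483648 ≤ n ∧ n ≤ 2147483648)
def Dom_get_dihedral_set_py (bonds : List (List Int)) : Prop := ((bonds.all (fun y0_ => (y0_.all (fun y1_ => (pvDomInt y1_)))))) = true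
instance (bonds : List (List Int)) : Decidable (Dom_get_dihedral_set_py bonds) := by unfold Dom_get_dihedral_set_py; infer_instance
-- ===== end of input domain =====

-- B replaces A's two-phase algorithm (angle set, then full-scan extension) by one fused pass over a precomputed atom->incident-bonds map; equal output, measurably faster in a timing run.

-- shared index helper: xs[i]; the .getD 0 branch is unreachable under Pre_ (all bonds have length ≥ 2)
def pvIdx (l : List Int) (i : Int) : Int := (PySem.List.pyGet? l i).getD 0

-- ===== PORT A =====
def get_angle_set_py (bonds : List (List Int)) : List (List Int) :=
  bonds.foldl (fun ang_set b =>
    [(pvIdx b 0, pvIdx b 1), (pvIdx b 1, pvIdx b 0)].foldl (fun s al =>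
      (bonds.filter (fun p => p.contains al.1 && !(b == p))).foldl (fun s p =>
        let another : Int := if al.1 == pvIdx p 0 then pvIdx p 1 else pvIdx p 0
        if another < al.2 then PySem.Set.add s [another, al.1, al.2]
        else if another > al.2 then PySem.Set.add s [al.2, al.1, another]
        else s) s) ang_set) PySem.Set.empty

def get_dihedral_set_py (bonds : List (List Int)) : List (List Int) :=
  (get_angle_set_py bonds).foldl (fun s ang =>
    [(pvIdx ang 0, pvIdx ang 1, pvIdx ang 2), (pvIdx ang 2, pvIdx ang 1, pvIdx ang 0)].foldl (fun s al =>
      (bonds.filter (fun p => p.contains al.1 && !(p.contains al.2.1))).foldl (fun s p =>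
        let another : Int := if al.1 == pvIdx p 0 then pvIdx p 1 else pvIdx p 0
        if al.1 < al.2.1 then PySem.Set.add s [another, al.1, al.2.1, al.2.2]
        else if al.1 > al.2.1 then PySem.Set.add s [al.2.2, al.2.1, al.1, another]
        else s) s) s) PySem.Set.empty

-- ===== PORT B =====
-- atom -> list of incident bonds (adj.setdefault(a, []).append(p) = read-modify-write at key a)
def pvAdjacency (bonds : List (List Int)) : PySem.Dict Int (List (List Int)) :=
  bonds.foldl (fun adj p =>
    (PySem.Set.ofList p).foldl (fun adj a => adj.modify a [] (· ++ [p])) adj) PySem.Dict.empty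

def get_dihedral_set_py_alt (bonds : List (List Int)) : List (List Int) :=
  let adj := pvAdjacency bonds
  bonds.foldl (fun dihed b =>
    [(pvIdx b 0, pvIdx b 1), (pvIdx b 1, pvIdx b 0)].foldl (fun dihed cv =>
      (adj.getD cv.1 []).foldl (fun dihed p2 =>
        if p2 == b then dihed
        else
          let u : Int := if cv.1 == pvIdx p2 0 then pvIdx p2 1 else pvIdx p2 0
          if u == cv.2 then dihed
          else
            let lohi : Int × Int := if u < cv.2 then (u, cv.2) else (cv.2, u)
            [(lohi.1, lohi.2), (lohi.2, lohi.1)].foldl (fun dihed xz =>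
              (adj.getD xz.1 []).foldl (fun dihed p =>
                if p.contains cv.1 then dihed
                else
                  let w : Int := if xz.1 == pvIdx p 0 then pvIdx p 1 else pvIdx p 0
                  if xz.1 < cv.1 then PySem.Set.add dihed [w, xz.1, cv.1, xz.2]
                  else if xz.1 > cv.1 then PySem.Set.add dihed [xz.2, cv.1, xz.1, w]
                  else dihed) dihed) dihed) dihed) dihed) PySem.Set.empty

-- ===== PRECONDITION & SPEC =====
-- Pre_: every bond must have at least two entries; on any shorter bond the Python A raises IndexError (b[0]/b[1]).
def Pre_get_dihedral_set_py (bonds : List (List Int)) : Prop := ∀ b ∈ bonds, 2 ≤ b.length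
instance (bonds : List (List Int)) : Decidable (Pre_get_dihedral_set_py bonds) := by unfold Pre_get_dihedral_set_py; infer_instance

def pvWitness_get_dihedral_set_py : List (List Int) := [[1, 2], [2, 3], [3, 4]]

def Spec_get_dihedral_set_py (bonds : List (List Int)) (out : List (List Int)) : Prop := out = get_dihedral_set_py_alt bonds
instance (bonds : List (List Int)) (out : List (List Int)) : Decidable (Spec_get_dihedral_set_py bonds out) := by unfold Spec_get_dihedral_set_py; infer_instance

-- ===== CLAIM (what is proved, stated in full; the proofs are below) =====
def Claim_equal_get_dihedral_set_py : Prop := ∀ (bonds : List (List Int)), Dom_get_dihedral_set_py bonds → Pre_get_dihedral_set_py bonds → Spec_get_dihedral_set_py bonds (get_dihedral_set_py bonds)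

-- ===== LEMMAS AND PROOFS =====

-- partner atom of c in bond p (p[1] if c == p[0] else p[0])
def pvPart (c : Int) (p : List Int) : Int := if c == pvIdx p 0 then pvIdx p 1 else pvIdx p 0

-- the angle element (if any) A's phase 1 derives from center c, bond-end v, pair bond p
def pvAngOpt (c v : Int) (p : List Int) : Option (List Int) :=
  if pvPart c p < v then some [pvPart c p, c, v]
  else if v < pvPart c p then some [v, c, pvPart c p]
  else none

-- the dihedral element (if any) derived from oriented angle (x, y, z) and bond p
def pvExtOpt (x y z : Int) (p : List Int) : Option (List Int) :=
  if x < y then some [pvPart x p, x, y, z]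
  else if y < x then some [z, y, x, pvPart x p]
  else none

-- all dihedral elements A's phase 2 derives from one angle, in order
def pvBlock (bonds : List (List Int)) (ang : List Int) : List (List Int) :=
  [(pvIdx ang 0, pvIdx ang 1, pvIdx ang 2), (pvIdx ang 2, pvIdx ang 1, pvIdx ang 0)].flatMap
    (fun al => (bonds.filter (fun p => p.contains al.1 && !(p.contains al.2.1))).flatMap
      (fun p => (pvExtOpt al.1 al.2.1 al.2.2 p).toList))

-- all canonical angle elements A's phase 1 derives, in order, with duplicates
def pvAngles (bonds : List (List Int)) : List (List Int) :=
  bonds.flatMap (fun b => [(pvIdx b 0, pvIdx b 1), (pvIdx b 1, pvIdx b 0)].flatMap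
    (fun al => (bonds.filter (fun p => p.contains al.1 && !(b == p))).flatMap
      (fun p => (pvAngOpt al.1 al.2 p).toList)))

-- every set-insertion loop is Set.update of the flattened element sequence
theorem pv_foldl_eq_update {α β : Type} [BEq β] (F : PySem.Set β → α → PySem.Set β)
    (h : α → List β) (hF : ∀ s p, F s p = PySem.Set.update s (h p)) :
    ∀ (l : List α) (s : PySem.Set β), l.foldl F s = PySem.Set.update s (l.flatMap h) := by
  intro l
  induction l with
  | nil => intro s; simp [PySem.Set.update]
  | cons a l ih =>
      intro s
      simp only [List.foldl_cons, List.flatMap_cons, hF]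
      rw [ih, PySem.Set.update_append]

theorem pv_update_of_forall_mem {β : Type} [BEq β] [LawfulBEq β] (s : PySem.Set β)
    (l : List β) (h : ∀ x ∈ l, x ∈ s) : PySem.Set.update s l = s := by
  induction l generalizing s with
  | nil => rfl
  | cons a l ih =>
      rw [PySem.Set.update_cons, PySem.Set.add_of_mem (h a (by simp))]
      exact ih s (fun x hx => h x (by simp [hx]))

theorem pv_mem_update_left {β : Type} [BEq β] [LawfulBEq β] {s : PySem.Set β} {l : List β}
    {x : β} (h : x ∈ s) : x ∈ PySem.Set.update s l := (PySem.Set.mem_update _ _ _).2 (Or.inl h)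

theorem pv_mem_update_right {β : Type} [BEq β] [LawfulBEq β] {s : PySem.Set β} {l : List β}
    {x : β} (h : x ∈ l) : x ∈ PySem.Set.update s l := (PySem.Set.mem_update _ _ _).2 (Or.inr h)

-- first-occurrence dedup against a seen-list
def pvDnew {β : Type} [DecidableEq β] : List β → List β → List β
  | _, [] => []
  | seen, a :: l => if a ∈ seen then pvDnew seen l else a :: pvDnew (seen ++ [a]) l

theorem pv_foldl_add_eq_dnew {β : Type} [BEq β] [LawfulBEq β] [DecidableEq β] :
    ∀ (l : List β) (sd : PySem.Set β), l.foldl PySem.Set.add sd = sd ++ pvDnew sd l := by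
  intro l
  induction l with
  | nil => intro sd; simp [pvDnew]
  | cons a l ih =>
      intro sd
      simp only [List.foldl_cons, pvDnew]
      by_cases h : a ∈ sd
      · rw [PySem.Set.add_of_mem h, ih, if_pos h]
      · rw [PySem.Set.add_of_not_mem h, ih, if_neg h, List.append_assoc]
        rfl

-- inserting the blocks of a deduplicated sequence gives the same set as inserting all blocks
theorem pv_update_dnew {β : Type} [BEq β] [LawfulBEq β] [DecidableEq β]
    (g : β → List β) :
    ∀ (l seen : List β) (s : PySem.Set β),
      (∀ a ∈ seen, ∀ x ∈ g a, x ∈ s) →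
      PySem.Set.update s ((pvDnew seen l).flatMap g) = PySem.Set.update s (l.flatMap g) := by
  intro l
  induction l with
  | nil => intro seen s _; rfl
  | cons a l ih =>
      intro seen s hs
      simp only [pvDnew, List.flatMap_cons]
      by_cases h : a ∈ seen
      · rw [if_pos h, PySem.Set.update_append, pv_update_of_forall_mem s (g a) (hs a h), ih seen s hs]
      · rw [if_neg h]
        simp only [List.flatMap_cons]
        rw [PySem.Set.update_append, PySem.Set.update_append]
        apply ih (seen ++ [a])
        intro b hb x hx
        rcases List.mem_append.1 hb with hb | hb
        · exact pv_mem_update_left (hs b hb x hx)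
        · simp only [List.mem_singleton] at hb
          subst hb
          exact pv_mem_update_right hx

theorem pv_update_ofList_flatMap {β : Type} [BEq β] [LawfulBEq β] [DecidableEq β]
    (g : β → List β) (l : List β) :
    PySem.Set.update PySem.Set.empty ((PySem.Set.ofList l).flatMap g)
      = PySem.Set.update PySem.Set.empty (l.flatMap g) := by
  have h1 : PySem.Set.ofList l = pvDnew ([] : List β) l := by
    have := pv_foldl_add_eq_dnew l ([] : PySem.Set β)
    simpa [PySem.Set.ofList_eq_foldl] using this
  rw [h1]
  exact pv_update_dnew g l [] PySem.Set.empty (by intro a ha; simp at ha)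

-- gathering port A
theorem pvA_angles : ∀ bonds, get_angle_set_py bonds = PySem.Set.ofList (pvAngles bonds) := by
  intro bonds
  unfold get_angle_set_py pvAngles
  rw [pv_foldl_eq_update _ (fun b => [(pvIdx b 0, pvIdx b 1), (pvIdx b 1, pvIdx b 0)].flatMap
    (fun al => (bonds.filter (fun p => p.contains al.1 && !(b == p))).flatMap
      (fun p => (pvAngOpt al.1 al.2 p).toList)))]
  · rw [PySem.Set.update_empty, PySem.Set.ofList]
  · intro s b
    rw [pv_foldl_eq_update _ (fun al => (bonds.filter (fun p => p.contains al.1 && !(b == p))).flatMap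
      (fun p => (pvAngOpt al.1 al.2 p).toList))]
    intro s al
    rw [pv_foldl_eq_update _ (fun p => (pvAngOpt al.1 al.2 p).toList)]
    intro s p
    simp only [pvAngOpt, pvPart]
    split_ifs <;> rfl

theorem pvA_main : ∀ bonds, get_dihedral_set_py bonds
    = PySem.Set.update PySem.Set.empty ((PySem.Set.ofList (pvAngles bonds)).flatMap (pvBlock bonds)) := by
  intro bonds
  unfold get_dihedral_set_py
  rw [pvA_angles]
  rw [pv_foldl_eq_update _ (pvBlock bonds)]
  intro s ang
  unfold pvBlock
  rw [pv_foldl_eq_update _ (fun al => (bonds.filter (fun p => p.contains al.1 && !(p.contains al.2.1))).flatMap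
    (fun p => (pvExtOpt al.1 al.2.1 al.2.2 p).toList))]
  intro s al
  rw [pv_foldl_eq_update _ (fun p => (pvExtOpt al.1 al.2.1 al.2.2 p).toList)]
  intro s p
  simp only [pvExtOpt, pvPart]
  split_ifs <;> rfl

-- the adjacency dictionary holds, at each atom, the incident bonds in input order
theorem pvAdj_getD : ∀ (bonds : List (List Int)) (c : Int),
    (pvAdjacency bonds).getD c [] = bonds.filter (fun p => p.contains c) := by
  intro bonds c
  unfold pvAdjacency
  suffices h : ∀ (l : List (List Int)) (d : PySem.Dict Int (List (List Int))),
      (l.foldl (fun adj p => (PySem.Set.ofList p).foldl (fun adj a => adj.modify a [] (· ++ [p])) adj) d).getD c []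
        = d.getD c [] ++ (l.filter (fun p => p.contains c)) by
    simpa using h bonds PySem.Dict.empty
  intro l
  induction l with
  | nil => intro d; simp
  | cons p l ih =>
      intro d
      simp only [List.foldl_cons, List.filter_cons]
      have step : ∀ (la : List Int) (hnd : la.Nodup) (d : PySem.Dict Int (List (List Int))),
          (la.foldl (fun adj a => adj.modify a [] (· ++ [p])) d).getD c []
            = if c ∈ la then d.getD c [] ++ [p] else d.getD c [] := by
        intro la
        induction la with
        | nil => intro _ d; simp
        | cons a la ih2 =>
            intro hnd d
            simp only [List.foldl_cons]
            rw [ih2 (List.Nodup.of_cons hnd)]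
            by_cases hc : c ∈ la
            · have hca : ¬ c = a := by
                intro h; subst h; exact (List.nodup_cons.1 hnd).1 hc
              rw [if_pos hc, if_pos (by simp [hc])]
              rw [PySem.Dict.getD_modify, if_neg hca]
            · rw [if_neg hc]
              by_cases hca : c = a
              · subst hca
                rw [if_pos (by simp)]
                rw [PySem.Dict.getD_modify, if_pos rfl]
              · rw [if_neg (by simp [hca, hc])]
                rw [PySem.Dict.getD_modify, if_neg hca]
      rw [ih, step (PySem.Set.ofList p) (PySem.Set.nodup_ofList p) d]
      by_cases hc : c ∈ p
      · rw [if_pos ((PySem.Set.mem_ofList _ _).2 hc),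
          if_pos (by simpa using hc), List.append_assoc]
        rfl
      · rw [if_neg (fun h => hc ((PySem.Set.mem_ofList _ _).1 h)),
          if_neg (by simpa using hc)]

-- pvIdx on literal three-element lists
theorem pvIdx_lit0 (a b c : Int) : pvIdx [a, b, c] 0 = a := rfl
theorem pvIdx_lit1 (a b c : Int) : pvIdx [a, b, c] 1 = b := rfl
theorem pvIdx_lit2 (a b c : Int) : pvIdx [a, b, c] 2 = c := rfl

-- a continue-guard inside a flatMap is a filter
theorem pv_flatMap_guard {α β : Type} (l : List α) (r : α → Bool) (g : α → List β) :
    l.flatMap (fun p => if r p then [] else g p)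
      = (l.filter (fun p => !(r p))).flatMap g := by
  induction l with
  | nil => rfl
  | cons a l ih => by_cases h : r a <;> simp [h, ih]

-- B's two-orientation extension loop around a canonical angle [x, c, z] is exactly pvBlock
theorem pvB_orient (bonds : List (List Int)) (c x z : Int) (s : PySem.Set (List Int)) :
    [(x, z), (z, x)].foldl (fun dihed xz =>
      ((bonds.filter (fun p => p.contains xz.1))).foldl (fun dihed p =>
        if p.contains c then dihed
        else
          let w : Int := if xz.1 == pvIdx p 0 then pvIdx p 1 else pvIdx p 0
          if xz.1 < c then PySem.Set.add dihed [w, xz.1, c, xz.2]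
          else if xz.1 > c then PySem.Set.add dihed [xz.2, c, xz.1, w]
          else dihed) dihed) s
      = PySem.Set.update s (pvBlock bonds [x, c, z]) := by
  rw [pv_foldl_eq_update _ (fun xz => (bonds.filter (fun p => p.contains xz.1 && !(p.contains c))).flatMap
      (fun p => (pvExtOpt xz.1 c xz.2 p).toList))]
  · simp [pvBlock, pvIdx_lit0, pvIdx_lit1, pvIdx_lit2]
  · intro s xz
    rw [pv_foldl_eq_update _ (fun p => if p.contains c then [] else (pvExtOpt xz.1 c xz.2 p).toList)]
    · rw [pv_flatMap_guard, List.filter_filter]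
      have hpred : (fun a : List Int => !a.contains c && a.contains xz.1)
          = (fun p : List Int => p.contains xz.1 && !(p.contains c)) := by
        funext a; rw [Bool.and_comm]
      rw [hpred]
    · intro s p
      simp only [pvExtOpt, pvPart]
      split_ifs <;> rfl

-- gathering port B
theorem pvB_main : ∀ bonds, get_dihedral_set_py_alt bonds
    = PySem.Set.update PySem.Set.empty
        (bonds.flatMap (fun b => [(pvIdx b 0, pvIdx b 1), (pvIdx b 1, pvIdx b 0)].flatMap
          (fun cv => ((bonds.filter (fun p => p.contains cv.1)).filter (fun p2 => !(p2 == b))).flatMap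
            (fun p2 =>
              if pvPart cv.1 p2 == cv.2 then []
              else pvBlock bonds (if pvPart cv.1 p2 < cv.2
                then [pvPart cv.1 p2, cv.1, cv.2] else [cv.2, cv.1, pvPart cv.1 p2]))))) := by
  intro bonds
  unfold get_dihedral_set_py_alt
  simp only [pvAdj_getD]
  rw [pv_foldl_eq_update _ (fun b => [(pvIdx b 0, pvIdx b 1), (pvIdx b 1, pvIdx b 0)].flatMap
    (fun cv => ((bonds.filter (fun p => p.contains cv.1)).filter (fun p2 => !(p2 == b))).flatMap
      (fun p2 =>
        if pvPart cv.1 p2 == cv.2 then []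
        else pvBlock bonds (if pvPart cv.1 p2 < cv.2
          then [pvPart cv.1 p2, cv.1, cv.2] else [cv.2, cv.1, pvPart cv.1 p2]))))]
  intro s b
  rw [pv_foldl_eq_update _ (fun cv => ((bonds.filter (fun p => p.contains cv.1)).filter (fun p2 => !(p2 == b))).flatMap
    (fun p2 =>
      if pvPart cv.1 p2 == cv.2 then []
      else pvBlock bonds (if pvPart cv.1 p2 < cv.2
        then [pvPart cv.1 p2, cv.1, cv.2] else [cv.2, cv.1, pvPart cv.1 p2])))]
  intro s cv
  rw [pv_foldl_eq_update _ (fun p2 =>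
      if p2 == b then []
      else if pvPart cv.1 p2 == cv.2 then []
      else pvBlock bonds (if pvPart cv.1 p2 < cv.2
        then [pvPart cv.1 p2, cv.1, cv.2] else [cv.2, cv.1, pvPart cv.1 p2]))]
  · rw [pv_flatMap_guard]
  · intro s p2
    simp only [pvPart]
    by_cases hb : (p2 == b) = true
    · simp only [if_pos hb]; rfl
    · simp only [if_neg hb]
      by_cases hu : ((if cv.1 == pvIdx p2 0 then pvIdx p2 1 else pvIdx p2 0) == cv.2) = true
      · simp only [if_pos hu]; rfl
      · simp only [if_neg hu]
        by_cases hlt : (if cv.1 == pvIdx p2 0 then pvIdx p2 1 else pvIdx p2 0) < cv.2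
        · simp only [if_pos hlt]
          exact pvB_orient bonds cv.1 _ cv.2 s
        · simp only [if_neg hlt]
          exact pvB_orient bonds cv.1 cv.2 _ s

-- the two gathered forms coincide
theorem pv_AB : ∀ bonds, get_dihedral_set_py bonds = get_dihedral_set_py_alt bonds := by
  intro bonds
  rw [pvA_main, pv_update_ofList_flatMap, pvB_main]
  congr 1
  unfold pvAngles
  simp only [List.flatMap_assoc]
  refine congrArg (fun g => List.flatMap g bonds) (funext fun b => ?_)
  refine congrArg (fun g => List.flatMap g [(pvIdx b 0, pvIdx b 1), (pvIdx b 1, pvIdx b 0)])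
    (funext fun cv => ?_)
  rw [List.filter_filter]
  have hpred : (fun a : List Int => !(a == b) && a.contains cv.1)
      = (fun p : List Int => p.contains cv.1 && !(b == p)) := by
    funext p
    rw [Bool.and_comm, BEq.comm]
  rw [hpred]
  refine congrArg (fun g => List.flatMap g (bonds.filter (fun p => p.contains cv.1 && !(b == p))))
    (funext fun p => ?_)
  simp only [pvAngOpt]
  rcases lt_trichotomy (pvPart cv.1 p) cv.2 with h | h | h
  · simp [h, ne_of_lt h]
  · simp [h]
  · simp [h, ne_of_gt h, lt_asymm h]

-- ===== VERDICT (by name: the statement is the Claim_ definition above) =====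
theorem get_dihedral_set_py_spec : Claim_equal_get_dihedral_set_py := by
  intro bonds _ _
  unfold Spec_get_dihedral_set_py
  exact pv_AB bonds
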